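-- pv_equiv track=rewrite | github.com/esrasrgl/AoC | y19/day6/orbit_part2.py | orbital_transfers
-- ===== SOURCE A (Python) =====
-- def orbital_transfers(you, san):
--     temp = len(you)
--     if(len(san) < len(you)):
--         temp = len(san)
--     for i in range(temp):
--         if(san[0] == you[0]):
--             san.remove(san[0])
--             you.remove(you[0])
--
--     return len(you) + len(san)
-- ===== SOURCE B (Python) =====
-- def orbital_transfers(you, san):
--     k = 0
--     for a, b in zip(you, san):
--         if a != b:
--             break
--         k += 1
--     return len(you) + len(san) - 2 * k
-- ===== Notes on version B (the rewrite author's own statement) =====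
-- stated objective: idiomatic
-- what changed: B computes the common-prefix length k in one zip pass and returns len(you)+len(san)-2k, instead of A's loop that repeatedly calls list.remove to pop matching heads; B also does not mutate its arguments.
import Mathlib
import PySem

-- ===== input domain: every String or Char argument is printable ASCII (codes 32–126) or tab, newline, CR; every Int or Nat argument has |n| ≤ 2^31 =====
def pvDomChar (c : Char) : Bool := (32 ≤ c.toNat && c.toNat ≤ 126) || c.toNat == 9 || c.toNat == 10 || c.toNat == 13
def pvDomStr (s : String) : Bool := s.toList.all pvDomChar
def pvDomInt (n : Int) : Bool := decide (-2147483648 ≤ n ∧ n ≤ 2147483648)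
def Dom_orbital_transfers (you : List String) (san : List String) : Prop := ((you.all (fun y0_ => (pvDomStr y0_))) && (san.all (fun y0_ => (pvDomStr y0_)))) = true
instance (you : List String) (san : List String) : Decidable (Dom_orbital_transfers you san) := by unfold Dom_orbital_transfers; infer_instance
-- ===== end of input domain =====

-- B: computes the common-prefix length in one zip pass and returns total - 2k, instead of A's loop of repeated list.remove of matching heads.
-- Note: Python A mutates `you` and `san` in place (removes the common prefix); B does not. The equivalence proved here is about the return value only.
-- ===== PORT A =====
-- one iteration of A's `for i in range(temp)` body: if san[0] == you[0], remove both heads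
def pvStepA (p : List String × List String) : List String × List String :=
  match p.1, p.2 with
  | y0 :: yt, s0 :: st => if s0 = y0 then (yt, st) else p
  | _, _ => p

def orbital_transfers (you : List String) (san : List String) : Int :=
  let temp := if san.length < you.length then san.length else you.length
  let r := (List.range temp).foldl (fun p _ => pvStepA p) (you, san)
  ((r.1.length + r.2.length : Nat) : Int)

-- ===== PORT B =====
-- B's `for a, b in zip(you, san): if a != b: break; k += 1`
def pvPrefLen : List String → List String → Nat
  | a :: as_, b :: bs => if a ≠ b then 0 else pvPrefLen as_ bs + 1
  | _, _ => 0

def orbital_transfers_alt (you : List String) (san : List String) : Int :=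
  ((you.length : Int) + (san.length : Int)) - 2 * (pvPrefLen you san : Int)

-- ===== PRECONDITION & SPEC =====
def Spec_orbital_transfers (you : List String) (san : List String) (out : Int) : Prop := out = orbital_transfers_alt you san
instance (you : List String) (san : List String) (out : Int) : Decidable (Spec_orbital_transfers you san out) := by unfold Spec_orbital_transfers; infer_instance

-- ===== CLAIM (what is proved, stated in full; the proofs are below) =====
def Claim_equal_orbital_transfers : Prop := ∀ (you : List String) (san : List String), Dom_orbital_transfers you san → Spec_orbital_transfers you san (orbital_transfers you san)

-- ===== LEMMAS AND PROOFS =====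

lemma foldl_range_ignore {α : Type} (g : α → α) (n : Nat) (a : α) :
    (List.range n).foldl (fun p _ => g p) a = g^[n] a := by
  induction n generalizing a with
  | zero => rfl
  | succ n ih =>
      rw [List.range_succ, List.foldl_append]
      simp [ih, Function.iterate_succ_apply']

lemma stepA_fix (p : List String × List String)
    (h : pvStepA p = p) (n : Nat) : pvStepA^[n] p = p := by
  induction n with
  | zero => rfl
  | succ n ih => rw [Function.iterate_succ_apply, h, ih]

lemma iter_min (you san : List String) :
    (pvStepA^[min you.length san.length] (you, san)).1.length
      + (pvStepA^[min you.length san.length] (you, san)).2.length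
      + 2 * pvPrefLen you san
    = you.length + san.length := by
  induction you generalizing san with
  | nil => simp [pvPrefLen]
  | cons y yt ih =>
      cases san with
      | nil => simp [pvPrefLen]
      | cons s st =>
          by_cases h : s = y
          · have hmin : min (y :: yt).length (s :: st).length
                = min yt.length st.length + 1 := by
              simp only [List.length_cons]; omega
            rw [hmin, Function.iterate_succ_apply]
            have hstep : pvStepA (y :: yt, s :: st) = (yt, st) := by
              simp [pvStepA, h]
            rw [hstep]
            have := ih st
            simp only [pvPrefLen, List.length_cons]
            subst h
            simp only [if_neg (by simp : ¬ (s ≠ s))]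
            omega
          · have hstep : pvStepA (y :: yt, s :: st) = (y :: yt, s :: st) := by
              simp [pvStepA, h]
            rw [stepA_fix _ hstep]
            have h' : y ≠ s := fun e => h e.symm
            simp [pvPrefLen, h']

-- ===== VERDICT (by name: the statement is the Claim_ definition above) =====
theorem orbital_transfers_spec : Claim_equal_orbital_transfers := by
  intro you san _
  unfold Spec_orbital_transfers orbital_transfers orbital_transfers_alt
  have htemp : (if san.length < you.length then san.length else you.length)
      = min you.length san.length := by
    rw [Nat.min_def]; split_ifs <;> omega
  rw [htemp]
  simp only [foldl_range_ignore]
  have := iter_min you san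
  push_cast
  omega
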